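-- pv_equiv track=rewrite | github.com/VishwajeetEkal/CSCI-B505-Applied-Algorithms | Assignment 3/QUE_03.py | zenthar_puzzle
-- ===== SOURCE A (Python) =====
-- def makeNumber(length_of_number, K, cn):
--         if length_of_number == 0:
--             return [cn]
--         answerNumbers = []
--
--         if cn % 10 + K <= 9:
--             answerNumbers += makeNumber(length_of_number - 1, K, cn * 10 + cn % 10 + K)
--
--         if K != 0 and cn % 10 >= K:
--             answerNumbers += makeNumber(length_of_number - 1, K, cn * 10 + cn % 10 - K)
--
--         return answerNumbers
--
-- def zenthar_puzzle( N,K):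
--     if N <= 0 or K < 0:
--         return []
--
--     result = []
--     i = 1
--     while i <10:
--         result += makeNumber(N - 1, K, i)
--         i+=1
--
--     result.sort()
--
--     return result
-- ===== SOURCE B (Python) =====
-- def zenthar_puzzle(N, K):
--     if N <= 0 or K < 0:
--         return []
--     frontier = list(range(1, 10))
--     for _ in range(N - 1):
--         if not frontier:
--             break
--         nxt = []
--         for x in frontier:
--             d = x % 10
--             if d + K <= 9:
--                 nxt.append(x * 10 + d + K)
--             if K != 0 and d >= K:
--                 nxt.append(x * 10 + d - K)
--         frontier = nxt
--     return sorted(frontier)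
-- ===== Notes on version B (the rewrite author's own statement) =====
-- stated objective: alternative
-- what changed: Replaces the per-start-digit recursion (building each suffix list via recursive list concatenation) with an iterative BFS frontier of partial numbers extended N-1 times, then one final sort.
import Mathlib
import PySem

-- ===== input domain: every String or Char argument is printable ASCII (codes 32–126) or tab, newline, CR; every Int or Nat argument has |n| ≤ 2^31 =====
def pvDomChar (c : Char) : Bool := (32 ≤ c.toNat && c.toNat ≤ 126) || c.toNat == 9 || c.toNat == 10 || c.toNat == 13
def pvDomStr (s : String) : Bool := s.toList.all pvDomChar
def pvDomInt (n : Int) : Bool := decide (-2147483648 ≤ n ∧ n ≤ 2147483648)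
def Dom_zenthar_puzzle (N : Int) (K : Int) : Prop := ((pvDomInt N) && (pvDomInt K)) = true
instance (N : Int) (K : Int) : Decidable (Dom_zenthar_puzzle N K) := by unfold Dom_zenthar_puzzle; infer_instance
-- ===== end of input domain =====

-- ===== PORT A =====
-- One honest line: B rebuilds the set iteratively as a BFS frontier extended N-1 times
-- instead of A's per-start-digit recursion; same results, a different decomposition.
-- Helper makeNumber: recursion on the (nonnegative) length, carried as a Nat; the Python
-- recursion is only ever called with a nonnegative length, on which this is exact.
def makeNumberA (K cn : Int) : Nat → List Int
  | 0 => [cn]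
  | n + 1 =>
    let answerNumbers : List Int := []
    let answerNumbers :=
      if PySem.Int.mod cn 10 + K ≤ 9 then
        answerNumbers ++ makeNumberA K (cn * 10 + PySem.Int.mod cn 10 + K) n
      else answerNumbers
    let answerNumbers :=
      if K ≠ 0 ∧ PySem.Int.mod cn 10 ≥ K then
        answerNumbers ++ makeNumberA K (cn * 10 + PySem.Int.mod cn 10 - K) n
      else answerNumbers
    answerNumbers

def zenthar_puzzle (N : Int) (K : Int) : List Int :=
  if N ≤ 0 ∨ K < 0 then []
  else
    let result := (PySem.List.pyRange 1 10 1).foldl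
      (fun res i => res ++ makeNumberA K i (N - 1).toNat) []
    PySem.List.sorted result (fun x => x) false

-- ===== PORT B =====
-- one extension pass: for x in frontier, append the admissible children of x
def stepB (K : Int) (frontier : List Int) : List Int :=
  frontier.foldl (fun nxt x =>
    let d := PySem.Int.mod x 10
    let nxt := if d + K ≤ 9 then nxt ++ [x * 10 + d + K] else nxt
    if K ≠ 0 ∧ d ≥ K then nxt ++ [x * 10 + d - K] else nxt) []

-- the 'for _ in range(N-1)' loop (count carried as a Nat), breaking on an empty frontier
def loopB (K : Int) : Nat → List Int → List Int
  | 0, frontier => frontier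
  | n + 1, frontier =>
    if frontier = [] then frontier else loopB K n (stepB K frontier)

def zenthar_puzzle_alt (N : Int) (K : Int) : List Int :=
  if N ≤ 0 ∨ K < 0 then []
  else
    PySem.List.sorted (loopB K (N - 1).toNat (PySem.List.pyRange 1 10 1)) (fun x => x) false

-- Pre_ excludes inputs with N > 950 and 0 ≤ K ≤ 9 (the only ones where A actually recurses
-- to depth N), on which A raises, or runs within a margin of, CPython's recursion limit
-- (RecursionError at depth ~1000; N ≤ 950 keeps a margin below the interpreter-dependent limit).
def Pre_zenthar_puzzle (N : Int) (K : Int) : Prop := N ≤ 950 ∨ K < 0 ∨ 9 < K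
instance (N : Int) (K : Int) : Decidable (Pre_zenthar_puzzle N K) := by
  unfold Pre_zenthar_puzzle; infer_instance
def pvWitness_zenthar_puzzle : Int × Int := (3, 2)

def Spec_zenthar_puzzle (N : Int) (K : Int) (out : List Int) : Prop := out = zenthar_puzzle_alt N K
instance (N : Int) (K : Int) (out : List Int) : Decidable (Spec_zenthar_puzzle N K out) := by unfold Spec_zenthar_puzzle; infer_instance

-- ===== CLAIM (what is proved, stated in full; the proofs are below) =====
def Claim_equal_zenthar_puzzle : Prop := ∀ (N : Int) (K : Int), Dom_zenthar_puzzle N K → Pre_zenthar_puzzle N K → Spec_zenthar_puzzle N K (zenthar_puzzle N K)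

-- ===== LEMMAS AND PROOFS =====


-- children of cn, as B computes them
def extendB (K x : Int) : List Int :=
  let d := PySem.Int.mod x 10
  (if d + K ≤ 9 then [x * 10 + d + K] else []) ++
    (if K ≠ 0 ∧ d ≥ K then [x * 10 + d - K] else [])

theorem mk_succ (K cn : Int) (n : Nat) :
    makeNumberA K cn (n + 1) = (extendB K cn).flatMap (fun c => makeNumberA K c n) := by
  simp only [makeNumberA, extendB]
  split_ifs <;> simp

theorem stepB_eq (K : Int) (xs : List Int) :
    stepB K xs = xs.flatMap (extendB K) := by
  have h : stepB K xs = xs.foldl (fun nxt x => nxt ++ extendB K x) [] := by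
    unfold stepB
    congr 1
    funext nxt x
    simp only [extendB]
    split_ifs <;> simp
  rw [h, PySem.List.foldl_append_eq_flatMap]
  simp

theorem flatMap_mk (K : Int) (n : Nat) (xs : List Int) :
    xs.flatMap (fun c => makeNumberA K c n) = loopB K n xs := by
  induction n generalizing xs with
  | zero => simp [makeNumberA, loopB]
  | succ n ih =>
    have : xs.flatMap (fun c => makeNumberA K c (n + 1))
        = (xs.flatMap (extendB K)).flatMap (fun c => makeNumberA K c n) := by
      rw [List.flatMap_assoc]
      simp only [mk_succ]
    rw [this, ← stepB_eq, ih]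
    by_cases h : xs = []
    · subst h; cases n <;> simp [loopB, stepB]
    · simp [loopB, h]

-- ===== VERDICT (by name: the statement is the Claim_ definition above) =====
theorem zenthar_puzzle_spec : Claim_equal_zenthar_puzzle := by
  intro N K _ _
  unfold Spec_zenthar_puzzle zenthar_puzzle zenthar_puzzle_alt
  split_ifs with h
  · rfl
  · congr 1
    rw [PySem.List.foldl_append_eq_flatMap]
    simp [flatMap_mk]
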